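-- pv_equiv track=rewrite | github.com/mdediuwhealey/grattitude | grattitude/view_helpers.py | check_affirmative
-- ===== SOURCE A (Python) =====
-- affirmatives = "yes y yee yea ye ya"
--
-- def check_affirmative(message):
--     message = message.lower()
--     for a in affirmatives.split():
--         if a in message:
--             return True
--     for m in message.split():
--         if m in affirmatives.split():
--             return True
--     return False
-- ===== SOURCE B (Python) =====
-- def check_affirmative(message):
--     # Every affirmative token contains 'y', and 'y' itself is an affirmative,
--     # so the whole check collapses to: does the lowercased message contain 'y'?
--     return 'y' in message.lower()
-- ===== Notes on version B (the rewrite author's own statement) =====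
-- stated objective: simpler
-- what changed: The two candidate-scanning loops collapse to a single character-membership test: since 'y' is itself an affirmative and every affirmative token contains 'y', A returns True exactly when the lowercased message contains 'y'.
import Mathlib
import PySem

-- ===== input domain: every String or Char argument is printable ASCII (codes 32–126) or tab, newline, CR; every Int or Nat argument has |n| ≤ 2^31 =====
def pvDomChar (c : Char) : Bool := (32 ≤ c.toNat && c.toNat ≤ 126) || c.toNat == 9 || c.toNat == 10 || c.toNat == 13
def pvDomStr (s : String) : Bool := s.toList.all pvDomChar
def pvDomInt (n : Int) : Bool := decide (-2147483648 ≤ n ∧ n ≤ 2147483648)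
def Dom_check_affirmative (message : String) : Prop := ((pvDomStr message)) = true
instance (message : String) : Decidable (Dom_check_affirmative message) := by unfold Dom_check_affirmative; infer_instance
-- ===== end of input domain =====

-- B replaces A's two candidate-scanning loops by the single test "'y' in message.lower()"
-- (every affirmative token contains 'y' and 'y' is itself an affirmative); objective: simpler.

-- ===== PORT A =====
def affirmatives : String := "yes y yee yea ye ya"

def check_affirmative (message : String) : Bool :=
  let m := PySem.Str.lower message
  if (PySem.Str.split₀ affirmatives).any (fun a => PySem.Str.isIn a m) then
    true
  else if (PySem.Str.split₀ m).any (fun w => (PySem.Str.split₀ affirmatives).contains w) then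
    true
  else
    false

-- ===== PORT B =====
def check_affirmative_alt (message : String) : Bool :=
  PySem.Str.isIn "y" (PySem.Str.lower message)

-- ===== PRECONDITION & SPEC =====
def Spec_check_affirmative (message : String) (out : Bool) : Prop := out = check_affirmative_alt message
instance (message : String) (out : Bool) : Decidable (Spec_check_affirmative message out) := by unfold Spec_check_affirmative; infer_instance

-- ===== CLAIM (what is proved, stated in full; the proofs are below) =====
def Claim_equal_check_affirmative : Prop := ∀ (message : String), Dom_check_affirmative message → Spec_check_affirmative message (check_affirmative message)

-- ===== LEMMAS AND PROOFS =====

-- Every character of every word produced by split₀.go comes from the input, the current word, or the accumulator.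
lemma mem_split₀_go_subset (c : Char) :
    ∀ (s cur : List Char) (acc : List (List Char)) (w : List Char),
      w ∈ PySem.Chars.split₀.go s cur acc → c ∈ w →
      c ∈ s ∨ c ∈ cur ∨ ∃ u ∈ acc, c ∈ u := by
  intro s
  induction s with
  | nil =>
    intro cur acc w hw hc
    simp only [PySem.Chars.split₀.go] at hw
    split at hw
    · right; right
      exact ⟨w, List.mem_reverse.mp hw, hc⟩
    · rcases List.mem_cons.mp (List.mem_reverse.mp hw) with h | h
      · subst h; right; left; exact List.mem_reverse.mp hc
      · right; right; exact ⟨w, h, hc⟩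
  | cons d rest ih =>
    intro cur acc w hw hc
    simp only [PySem.Chars.split₀.go] at hw
    split at hw
    · split at hw
      · rcases ih [] acc w hw hc with h | h | h
        · exact Or.inl (List.mem_cons_of_mem _ h)
        · simp at h
        · exact Or.inr (Or.inr h)
      · rcases ih [] (cur.reverse :: acc) w hw hc with h | h | ⟨u, hu, hcu⟩
        · exact Or.inl (List.mem_cons_of_mem _ h)
        · simp at h
        · rcases List.mem_cons.mp hu with h | h
          · subst h; exact Or.inr (Or.inl (List.mem_reverse.mp hcu))
          · exact Or.inr (Or.inr ⟨u, h, hcu⟩)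
    · rcases ih (d :: cur) acc w hw hc with h | h | h
      · exact Or.inl (List.mem_cons_of_mem _ h)
      · rcases List.mem_cons.mp h with h | h
        · subst h; exact Or.inl List.mem_cons_self
        · exact Or.inr (Or.inl h)
      · exact Or.inr (Or.inr h)

lemma mem_split₀_subset {c : Char} {l w : List Char}
    (hw : w ∈ PySem.Chars.split₀ l) (hc : c ∈ w) : c ∈ l := by
  rcases mem_split₀_go_subset c l [] [] w hw hc with h | h | ⟨u, hu, _⟩
  · exact h
  · simp at h
  · simp at hu

lemma affs_eval : PySem.Str.split₀ affirmatives = ["yes", "y", "yee", "yea", "ye", "ya"] := by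
  decide

lemma y_mem_of_mem_affs {a : String} (ha : a ∈ PySem.Str.split₀ affirmatives) :
    'y' ∈ a.toList := by
  rw [affs_eval] at ha
  fin_cases ha <;> decide

-- ===== VERDICT (by name: the statement is the Claim_ definition above) =====
theorem check_affirmative_spec : Claim_equal_check_affirmative := by
  intro message _
  unfold Spec_check_affirmative check_affirmative check_affirmative_alt
  set m := PySem.Str.lower message with hm
  by_cases hy : PySem.Str.isIn "y" m = true
  · have h1 : (PySem.Str.split₀ affirmatives).any (fun a => PySem.Str.isIn a m) = true := by
      rw [affs_eval]
      simp only [List.any_cons, Bool.or_eq_true]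
      exact Or.inr (Or.inl hy)
    simp only [h1, if_true]
    exact hy.symm
  · have hymem : 'y' ∉ m.toList := by
      intro hc
      apply hy
      rw [PySem.Str.isIn_iff_infix]
      obtain ⟨s, t, hst⟩ := List.append_of_mem hc
      exact ⟨s, t, by rw [hst]; simp⟩
    have h1 : (PySem.Str.split₀ affirmatives).any (fun a => PySem.Str.isIn a m) = false := by
      rw [List.any_eq_false]
      intro a ha
      simp only [Bool.not_eq_true]
      by_contra hcontra
      rw [Bool.not_eq_false] at hcontra
      have := (PySem.Str.isIn_iff_infix a m).mp hcontra
      exact hymem (this.subset (y_mem_of_mem_affs ha))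
    have h2 : (PySem.Str.split₀ m).any (fun w => (PySem.Str.split₀ affirmatives).contains w) = false := by
      rw [List.any_eq_false]
      intro w hw
      simp only [List.contains_eq_mem, decide_eq_true_eq]
      intro hmem
      have hwchars : w.toList ∈ PySem.Chars.split₀ m.toList := by
        rw [← PySem.Str.split₀_map_toList]
        exact List.mem_map_of_mem hw
      exact hymem (mem_split₀_subset hwchars (y_mem_of_mem_affs hmem))
    simp only [h1, h2, Bool.false_eq_true, if_false]
    rw [Bool.not_eq_true] at hy
    exact hy.symm
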